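-- pv_equiv track=rewrite | github.com/darkcalm/research-tinkering | external/proposal/archive/20250602_203557-4.1.1.1/tools/4.2.1.1_paper_review.py | get_relevance_level
-- ===== SOURCE A (Python) =====
-- def get_relevance_level(total_score, category_scores):
--     """Determine relevance level based on scores."""
--     if total_score >= 36 and all(score >= 12 for score in category_scores.values()):
--         return "Primary (Highly Relevant)"
--     elif total_score >= 27 and all(score >= 9 for score in category_scores.values()):
--         return "Secondary (Moderately Relevant)"
--     elif total_score >= 18 and all(score >= 6 for score in category_scores.values()):
--         return "Tertiary (Minimally Relevant)"
--     else:
--         return "Not Relevant"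
-- ===== SOURCE B (Python) =====
-- def get_relevance_level(total_score, category_scores):
--     """Determine relevance level based on scores."""
--     # Thresholds are proportional (36/27/18 total, 12/9/6 per category), so the
--     # level is a single integer tier: min of total_score//9 and every score//3.
--     tier = total_score // 9
--     for score in category_scores.values():
--         tier = min(tier, score // 3)
--     return {4: "Primary (Highly Relevant)",
--             3: "Secondary (Moderately Relevant)",
--             2: "Tertiary (Minimally Relevant)"}.get(min(tier, 4), "Not Relevant")
-- ===== Notes on version B (the rewrite author's own statement) =====
-- stated objective: alternative
-- what changed: B replaces A's three threshold-branch checks by arithmetic: it exploits that the thresholds are proportional (total 36/27/18 = 9*tier, category 12/9/6 = 3*tier), folds a single integer tier index min(total_score//9, min(score//3)) over the scores, and maps the clamped tier to its label through a dict lookup with no comparisons against the original thresholds at all.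
import Mathlib
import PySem

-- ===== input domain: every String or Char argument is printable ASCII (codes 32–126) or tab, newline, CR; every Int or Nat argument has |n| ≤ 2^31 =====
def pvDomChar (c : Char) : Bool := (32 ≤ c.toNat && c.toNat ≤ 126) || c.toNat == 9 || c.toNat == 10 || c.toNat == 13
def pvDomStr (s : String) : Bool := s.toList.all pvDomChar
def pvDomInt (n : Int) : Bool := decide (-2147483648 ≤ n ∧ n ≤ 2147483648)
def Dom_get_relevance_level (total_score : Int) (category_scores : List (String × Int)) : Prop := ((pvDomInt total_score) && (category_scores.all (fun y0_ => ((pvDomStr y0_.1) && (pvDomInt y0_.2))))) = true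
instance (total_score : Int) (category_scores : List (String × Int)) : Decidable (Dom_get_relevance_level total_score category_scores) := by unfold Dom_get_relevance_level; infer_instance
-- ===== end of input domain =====

-- B replaces A's three per-threshold branches by a single arithmetic tier index
-- min(total_score//9, min(score//3)) mapped to its label via a dict lookup (alternative decomposition).
-- ===== PORT A =====
def get_relevance_level (total_score : Int) (category_scores : List (String × Int)) : String :=
  if total_score ≥ 36 ∧ (category_scores.map Prod.snd).all (fun score => score ≥ 12) then
    "Primary (Highly Relevant)"
  else if total_score ≥ 27 ∧ (category_scores.map Prod.snd).all (fun score => score ≥ 9) then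
    "Secondary (Moderately Relevant)"
  else if total_score ≥ 18 ∧ (category_scores.map Prod.snd).all (fun score => score ≥ 6) then
    "Tertiary (Minimally Relevant)"
  else
    "Not Relevant"

-- ===== PORT B =====
-- tier = total_score // 9; for score in values: tier = min(tier, score // 3)
def pvTier (total_score : Int) (category_scores : List (String × Int)) : Int :=
  category_scores.foldl (fun tier p => min tier (PySem.Int.floordiv p.2 3))
    (PySem.Int.floordiv total_score 9)

def get_relevance_level_alt (total_score : Int) (category_scores : List (String × Int)) : String :=
  (PySem.Dict.ofList
      [((4 : Int), "Primary (Highly Relevant)"),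
       (3, "Secondary (Moderately Relevant)"),
       (2, "Tertiary (Minimally Relevant)")]).getD
    (min (pvTier total_score category_scores) 4) "Not Relevant"

-- ===== PRECONDITION & SPEC =====
def Spec_get_relevance_level (total_score : Int) (category_scores : List (String × Int)) (out : String) : Prop := out = get_relevance_level_alt total_score category_scores
instance (total_score : Int) (category_scores : List (String × Int)) (out : String) : Decidable (Spec_get_relevance_level total_score category_scores out) := by unfold Spec_get_relevance_level; infer_instance

-- ===== CLAIM (what is proved, stated in full; the proofs are below) =====
def Claim_equal_get_relevance_level : Prop := ∀ (total_score : Int) (category_scores : List (String × Int)), Dom_get_relevance_level total_score category_scores → Spec_get_relevance_level total_score category_scores (get_relevance_level total_score category_scores)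

-- ===== LEMMAS AND PROOFS =====
-- the fold of min is ≥ t iff the seed and every folded-in value are ≥ t
theorem foldl_min_ge (xs : List (String × Int)) (i t : Int) :
    t ≤ xs.foldl (fun tier p => min tier (PySem.Int.floordiv p.2 3)) i
      ↔ t ≤ i ∧ ∀ p ∈ xs, t ≤ PySem.Int.floordiv p.2 3 := by
  induction xs generalizing i with
  | nil => simp
  | cons x xs ih =>
    simp only [List.foldl_cons, ih, le_min_iff, List.mem_cons]
    constructor
    · rintro ⟨⟨h1, h2⟩, h3⟩
      exact ⟨h1, fun p hp => hp.elim (fun e => e ▸ h2) (h3 p)⟩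
    · rintro ⟨h1, h2⟩
      exact ⟨⟨h1, h2 x (Or.inl rfl)⟩, fun p hp => h2 p (Or.inr hp)⟩

-- tier ≥ t says exactly "total_score ≥ 9t and every score ≥ 3t"
theorem tier_ge (total_score : Int) (category_scores : List (String × Int)) (t : Int) :
    t ≤ pvTier total_score category_scores
      ↔ 9 * t ≤ total_score ∧ ∀ p ∈ category_scores, 3 * t ≤ p.2 := by
  unfold pvTier
  rw [foldl_min_ge, PySem.Int.le_floordiv_iff_mul_le (by norm_num)]
  constructor
  · rintro ⟨h1, h2⟩
    refine ⟨by linarith, fun p hp => ?_⟩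
    have := (PySem.Int.le_floordiv_iff_mul_le (b := 3) (by norm_num)).1 (h2 p hp)
    linarith
  · rintro ⟨h1, h2⟩
    refine ⟨by linarith, fun p hp => ?_⟩
    exact (PySem.Int.le_floordiv_iff_mul_le (by norm_num)).2 (by have := h2 p hp; linarith)

-- A's per-branch condition rewritten through the tier index
theorem branch_iff (total_score : Int) (category_scores : List (String × Int)) (t : Int) :
    (total_score ≥ 9 * t ∧ (category_scores.map Prod.snd).all (fun score => decide (score ≥ 3 * t)) = true)
      ↔ t ≤ pvTier total_score category_scores := by
  rw [tier_ge]
  simp [List.all_map, List.all_eq_true, ge_iff_le, Function.comp_def]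

-- evaluating B's literal dict lookup at a symbolic key
theorem dict_lookup (k : Int) :
    (PySem.Dict.ofList
      [((4 : Int), "Primary (Highly Relevant)"),
       (3, "Secondary (Moderately Relevant)"),
       (2, "Tertiary (Minimally Relevant)")]).getD k "Not Relevant"
    = if k = 4 then "Primary (Highly Relevant)"
      else if k = 3 then "Secondary (Moderately Relevant)"
      else if k = 2 then "Tertiary (Minimally Relevant)"
      else "Not Relevant" := by
  simp [PySem.Dict.ofList, PySem.Dict.update, PySem.Dict.getD_insert, PySem.Dict.getD_empty]
  split_ifs <;> first | rfl | omega

-- ===== VERDICT (by name: the statement is the Claim_ definition above) =====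
theorem get_relevance_level_spec : Claim_equal_get_relevance_level := by
  intro total_score category_scores _
  unfold Spec_get_relevance_level get_relevance_level get_relevance_level_alt
  rw [dict_lookup]
  have h4 : (total_score ≥ 36 ∧ ((category_scores.map Prod.snd).all fun score => decide (score ≥ 12)) = true) ↔ 4 ≤ pvTier total_score category_scores := by
    simpa using branch_iff total_score category_scores 4
  have h3 : (total_score ≥ 27 ∧ ((category_scores.map Prod.snd).all fun score => decide (score ≥ 9)) = true) ↔ 3 ≤ pvTier total_score category_scores := by
    simpa using branch_iff total_score category_scores 3
  have h2 : (total_score ≥ 18 ∧ ((category_scores.map Prod.snd).all fun score => decide (score ≥ 6)) = true) ↔ 2 ≤ pvTier total_score category_scores := by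
    simpa using branch_iff total_score category_scores 2
  set T := pvTier total_score category_scores with hT
  by_cases c4 : 4 ≤ T
  · rw [if_pos (h4.2 c4), if_pos (by omega)]
  · rw [if_neg (fun h => c4 (h4.1 h))]
    by_cases c3 : 3 ≤ T
    · rw [if_pos (h3.2 c3), if_neg (by omega), if_pos (by omega)]
    · rw [if_neg (fun h => c3 (h3.1 h))]
      by_cases c2 : 2 ≤ T
      · rw [if_pos (h2.2 c2), if_neg (by omega), if_neg (by omega), if_pos (by omega)]
      · rw [if_neg (fun h => c2 (h2.1 h)), if_neg (by omega), if_neg (by omega), if_neg (by omega)]
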